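-- pv_equiv track=rewrite | github.com/SleepCloudMX/CubePatterns | patterns.py | build_moves
-- ===== SOURCE A (Python) =====
-- def build_moves(layer: int, mid: int, row: int, cols: list[list[int]]) -> list[str]:
--     moves: list[str] = []
--     for left, right in cols:
--         if right <= mid:
--             if left == right:
--                 moves.append(f"{left}L'")
--             else:
--                 moves.append(f"{right}Lw'")
--                 if left == 2:
--                     moves.append('L')
--                 elif left == 3:
--                     moves.append('Lw')
--                 else:
--                     moves.append(f'{left - 1}Lw')
--         else:
--             left = layer - left + 1
--             right = layer - right + 1
--             if left == right:
--                 moves.append(f'{right}R')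
--             else:
--                 moves.append(f'{left}Rw')
--                 if right == 2:
--                     moves.append("R'")
--                 elif right == 3:
--                     moves.append("Rw'")
--                 else:
--                     moves.append(f"{right - 1}Rw'")
--
--     moves.append(f'{row}U')
--
--     for left, right in cols:
--         if right <= mid:
--             if left == right:
--                 moves.append(f'{left}L')
--             else:
--                 moves.append(f'{right}Lw')
--                 if left == 2:
--                     moves.append("L'")
--                 elif left == 3:
--                     moves.append("Lw'")
--                 else:
--                     moves.append(f"{left - 1}Lw'")
--         else:
--             left = layer - left + 1
--             right = layer - right + 1
--             if left == right:
--                 moves.append(f"{right}R'")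
--             else:
--                 moves.append(f"{left}Rw'")
--                 if right == 2:
--                     moves.append('R')
--                 elif right == 3:
--                     moves.append('Rw')
--                 else:
--                     moves.append(f'{right - 1}Rw')
--
--     moves.append(f"{row}U'")
--     return moves
-- ===== SOURCE B (Python) =====
-- def build_moves(layer: int, mid: int, row: int, cols: list[list[int]]) -> list[str]:
--     forward: list[str] = []
--     for left, right in cols:
--         if right <= mid:
--             if left == right:
--                 forward.append(f"{left}L'")
--             else:
--                 forward.append(f"{right}Lw'")
--                 forward.append('L' if left == 2 else 'Lw' if left == 3 else f'{left - 1}Lw')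
--         else:
--             l = layer - left + 1
--             r = layer - right + 1
--             if l == r:
--                 forward.append(f'{r}R')
--             else:
--                 forward.append(f'{l}Rw')
--                 forward.append("R'" if r == 2 else "Rw'" if r == 3 else f"{r - 1}Rw'")
--     toggled = [m[:-1] if m.endswith("'") else m + "'" for m in forward]
--     return forward + [f'{row}U'] + toggled + [f"{row}U'"]
-- ===== Notes on version B (the rewrite author's own statement) =====
-- stated objective: simpler
-- what changed: B traverses cols only once, building the forward half of the move list; the entire second branch cascade is replaced by mapping a toggle (strip a trailing apostrophe if present, else append one) over the forward half.
import Mathlib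
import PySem

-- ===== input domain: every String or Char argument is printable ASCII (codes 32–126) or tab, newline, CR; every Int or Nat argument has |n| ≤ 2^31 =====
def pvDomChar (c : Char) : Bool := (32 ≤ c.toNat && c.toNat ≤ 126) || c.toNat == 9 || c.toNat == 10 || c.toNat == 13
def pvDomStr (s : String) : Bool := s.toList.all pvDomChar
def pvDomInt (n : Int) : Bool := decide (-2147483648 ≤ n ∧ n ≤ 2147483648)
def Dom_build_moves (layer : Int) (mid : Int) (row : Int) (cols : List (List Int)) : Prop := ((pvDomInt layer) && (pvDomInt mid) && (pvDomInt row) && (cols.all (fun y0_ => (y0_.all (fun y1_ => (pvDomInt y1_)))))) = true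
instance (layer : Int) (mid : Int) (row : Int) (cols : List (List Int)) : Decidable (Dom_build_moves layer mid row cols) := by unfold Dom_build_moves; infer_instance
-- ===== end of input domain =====

-- B builds only the forward half of the move list and derives the reverse half by
-- toggling a trailing apostrophe on each forward move (objective: simpler — the
-- whole second branch cascade disappears).

-- ===== PORT A =====
-- loop body of A's first 'for left, right in cols' (non-pair rows raise in Python; excluded by Pre_)
def pvLoopA1 (layer : Int) (mid : Int) (moves : List String) (c : List Int) : List String :=
  match c with
  | [left, right] =>
    if right ≤ mid then
      if left = right then moves ++ [PySem.Int.toStr left ++ "L'"]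
      else
        let moves := moves ++ [PySem.Int.toStr right ++ "Lw'"]
        if left = 2 then moves ++ ["L"]
        else if left = 3 then moves ++ ["Lw"]
        else moves ++ [PySem.Int.toStr (left - 1) ++ "Lw"]
    else
      let left := layer - left + 1
      let right := layer - right + 1
      if left = right then moves ++ [PySem.Int.toStr right ++ "R"]
      else
        let moves := moves ++ [PySem.Int.toStr left ++ "Rw"]
        if right = 2 then moves ++ ["R'"]
        else if right = 3 then moves ++ ["Rw'"]
        else moves ++ [PySem.Int.toStr (right - 1) ++ "Rw'"]
  | _ => moves

-- loop body of A's second 'for left, right in cols'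
def pvLoopA2 (layer : Int) (mid : Int) (moves : List String) (c : List Int) : List String :=
  match c with
  | [left, right] =>
    if right ≤ mid then
      if left = right then moves ++ [PySem.Int.toStr left ++ "L"]
      else
        let moves := moves ++ [PySem.Int.toStr right ++ "Lw"]
        if left = 2 then moves ++ ["L'"]
        else if left = 3 then moves ++ ["Lw'"]
        else moves ++ [PySem.Int.toStr (left - 1) ++ "Lw'"]
    else
      let left := layer - left + 1
      let right := layer - right + 1
      if left = right then moves ++ [PySem.Int.toStr right ++ "R'"]
      else
        let moves := moves ++ [PySem.Int.toStr left ++ "Rw'"]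
        if right = 2 then moves ++ ["R"]
        else if right = 3 then moves ++ ["Rw"]
        else moves ++ [PySem.Int.toStr (right - 1) ++ "Rw"]
  | _ => moves

def build_moves (layer : Int) (mid : Int) (row : Int) (cols : List (List Int)) : List String :=
  let moves : List String := []
  let moves := cols.foldl (pvLoopA1 layer mid) moves
  let moves := moves ++ [PySem.Int.toStr row ++ "U"]
  let moves := cols.foldl (pvLoopA2 layer mid) moves
  moves ++ [PySem.Int.toStr row ++ "U'"]

-- ===== PORT B =====
-- m[:-1] if m.endswith("'") else m + "'"
def pvToggle (m : String) : String :=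
  if PySem.Str.endswith m "'" then PySem.Str.slice m none (some (-1)) else m ++ "'"

-- loop body of B's single 'for left, right in cols'
def pvLoopB (layer : Int) (mid : Int) (fwd : List String) (c : List Int) : List String :=
  match c with
  | [left, right] =>
    if right ≤ mid then
      if left = right then fwd ++ [PySem.Int.toStr left ++ "L'"]
      else
        fwd ++ [PySem.Int.toStr right ++ "Lw'"]
            ++ [if left = 2 then "L" else if left = 3 then "Lw" else PySem.Int.toStr (left - 1) ++ "Lw"]
    else
      let l := layer - left + 1
      let r := layer - right + 1
      if l = r then fwd ++ [PySem.Int.toStr r ++ "R"]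
      else
        fwd ++ [PySem.Int.toStr l ++ "Rw"]
            ++ [if r = 2 then "R'" else if r = 3 then "Rw'" else PySem.Int.toStr (r - 1) ++ "Rw'"]
  | _ => fwd

def build_moves_alt (layer : Int) (mid : Int) (row : Int) (cols : List (List Int)) : List String :=
  let forward := cols.foldl (pvLoopB layer mid) []
  let toggled := forward.map pvToggle
  forward ++ [PySem.Int.toStr row ++ "U"] ++ toggled ++ [PySem.Int.toStr row ++ "U'"]

-- ===== PRECONDITION & SPEC =====
-- Pre_ excludes cols rows that are not exact pairs: Python's 'for left, right in cols' raises ValueError there (both A and B).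
def Pre_build_moves (layer : Int) (mid : Int) (row : Int) (cols : List (List Int)) : Prop :=
  ∀ c ∈ cols, c.length = 2
instance (layer : Int) (mid : Int) (row : Int) (cols : List (List Int)) : Decidable (Pre_build_moves layer mid row cols) := by unfold Pre_build_moves; infer_instance
def pvWitness_build_moves : Int × Int × Int × List (List Int) := (5, 2, 1, [[1, 1], [2, 3], [1, 4]])

def Spec_build_moves (layer : Int) (mid : Int) (row : Int) (cols : List (List Int)) (out : List String) : Prop := out = build_moves_alt layer mid row cols
instance (layer : Int) (mid : Int) (row : Int) (cols : List (List Int)) (out : List String) : Decidable (Spec_build_moves layer mid row cols out) := by unfold Spec_build_moves; infer_instance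

-- ===== CLAIM (what is proved, stated in full; the proofs are below) =====
def Claim_equal_build_moves : Prop := ∀ (layer : Int) (mid : Int) (row : Int) (cols : List (List Int)), Dom_build_moves layer mid row cols → Pre_build_moves layer mid row cols → Spec_build_moves layer mid row cols (build_moves layer mid row cols)

-- ===== LEMMAS AND PROOFS =====

theorem pvToggle_rm (s w : String) (h : s.toList = w.toList ++ ['\'']) : pvToggle s = w := by
  unfold pvToggle
  rw [if_pos]
  · apply String.toList_inj.mp
    rw [PySem.Str.slice_to_neg_one, h, List.dropLast_concat]
  · rw [PySem.Str.endswith_eq, PySem.Chars.endswith_iff]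
    exact ⟨w.toList, by simpa using h.symm⟩

theorem pvToggle_add (s : String) (b : List Char) (c : Char) (h : s.toList = b ++ [c])
    (hc : c ≠ '\'') : pvToggle s = s ++ "'" := by
  unfold pvToggle
  rw [if_neg]
  intro hend
  rw [PySem.Str.endswith_eq, PySem.Chars.endswith_iff] at hend
  obtain ⟨p, hp⟩ := hend
  have h1 : s.toList.getLast? = some c := by rw [h]; simp
  have h2 : s.toList.getLast? = some '\'' := by rw [← hp]; simp
  exact hc (by rw [h1] at h2; injection h2)

theorem pvLoopA1_shift (layer mid : Int) (acc : List String) (c : List Int) :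
    pvLoopA1 layer mid acc c = acc ++ pvLoopA1 layer mid [] c := by
  rcases c with _ | ⟨l, _ | ⟨r, _ | ⟨x, t⟩⟩⟩ <;> simp only [pvLoopA1] <;> (try split_ifs) <;> simp

theorem pvLoopA2_shift (layer mid : Int) (acc : List String) (c : List Int) :
    pvLoopA2 layer mid acc c = acc ++ pvLoopA2 layer mid [] c := by
  rcases c with _ | ⟨l, _ | ⟨r, _ | ⟨x, t⟩⟩⟩ <;> simp only [pvLoopA2] <;> (try split_ifs) <;> simp

theorem pvLoopB_shift (layer mid : Int) (acc : List String) (c : List Int) :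
    pvLoopB layer mid acc c = acc ++ pvLoopB layer mid [] c := by
  rcases c with _ | ⟨l, _ | ⟨r, _ | ⟨x, t⟩⟩⟩ <;> simp only [pvLoopB] <;> (try split_ifs) <;> simp

theorem pvFoldl_flatMap (f : List String → List Int → List String)
    (h : ∀ acc c, f acc c = acc ++ f [] c) (l : List (List Int)) (acc : List String) :
    l.foldl f acc = acc ++ l.flatMap (f []) := by
  have hf : f = fun acc c => acc ++ f [] c := funext fun a => funext fun c => h a c
  rw [hf]
  exact PySem.List.foldl_append_eq_flatMap _ _ _

theorem pvLoopB_eq_A1 (layer mid : Int) (c : List Int) :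
    pvLoopB layer mid [] c = pvLoopA1 layer mid [] c := by
  rcases c with _ | ⟨l, _ | ⟨r, _ | ⟨x, t⟩⟩⟩ <;> simp only [pvLoopA1, pvLoopB] <;>
    (try split_ifs) <;> simp

theorem pvToggle_L' (n : Int) : pvToggle (PySem.Int.toStr n ++ "L'") = PySem.Int.toStr n ++ "L" := by
  apply pvToggle_rm; simp [String.toList_append]

theorem pvToggle_Lw' (n : Int) : pvToggle (PySem.Int.toStr n ++ "Lw'") = PySem.Int.toStr n ++ "Lw" := by
  apply pvToggle_rm; simp [String.toList_append]

theorem pvToggle_Rw'n (n : Int) : pvToggle (PySem.Int.toStr n ++ "Rw'") = PySem.Int.toStr n ++ "Rw" := by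
  apply pvToggle_rm; simp [String.toList_append]

theorem pvToggle_R' : pvToggle "R'" = "R" := by apply pvToggle_rm; simp

theorem pvToggle_Rw' : pvToggle "Rw'" = "Rw" := by apply pvToggle_rm; simp

theorem pvToggle_L : pvToggle "L" = "L'" := by
  rw [pvToggle_add _ [] 'L' (by simp) (by decide)]
  apply String.toList_inj.mp; simp

theorem pvToggle_Lw : pvToggle "Lw" = "Lw'" := by
  rw [pvToggle_add _ ['L'] 'w' (by simp) (by decide)]
  apply String.toList_inj.mp; simp

theorem pvToggle_Lwn (n : Int) : pvToggle (PySem.Int.toStr n ++ "Lw") = PySem.Int.toStr n ++ "Lw'" := by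
  rw [pvToggle_add _ ((PySem.Int.toStr n).toList ++ ['L']) 'w' (by simp) (by decide)]
  apply String.toList_inj.mp; simp

theorem pvToggle_Rn (n : Int) : pvToggle (PySem.Int.toStr n ++ "R") = PySem.Int.toStr n ++ "R'" := by
  rw [pvToggle_add _ ((PySem.Int.toStr n).toList) 'R' (by simp) (by decide)]
  apply String.toList_inj.mp; simp

theorem pvToggle_Rwn (n : Int) : pvToggle (PySem.Int.toStr n ++ "Rw") = PySem.Int.toStr n ++ "Rw'" := by
  rw [pvToggle_add _ ((PySem.Int.toStr n).toList ++ ['R']) 'w' (by simp) (by decide)]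
  apply String.toList_inj.mp; simp

theorem pvLoopA2_eq_toggle (layer mid : Int) (c : List Int) :
    pvLoopA2 layer mid [] c = (pvLoopA1 layer mid [] c).map pvToggle := by
  rcases c with _ | ⟨l, _ | ⟨r, _ | ⟨x, t⟩⟩⟩ <;> simp only [pvLoopA1, pvLoopA2] <;>
    (try split_ifs) <;>
    simp [pvToggle_L', pvToggle_Lw', pvToggle_Rw'n, pvToggle_R', pvToggle_Rw',
          pvToggle_L, pvToggle_Lw, pvToggle_Lwn, pvToggle_Rn, pvToggle_Rwn]

-- ===== VERDICT (by name: the statement is the Claim_ definition above) =====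
theorem build_moves_spec : Claim_equal_build_moves := by
  intro layer mid row cols _ _
  unfold Spec_build_moves build_moves build_moves_alt
  dsimp only
  rw [pvFoldl_flatMap _ (pvLoopA1_shift layer mid) cols,
      pvFoldl_flatMap _ (pvLoopA2_shift layer mid) cols,
      pvFoldl_flatMap _ (pvLoopB_shift layer mid) cols,
      funext (pvLoopB_eq_A1 layer mid), funext (pvLoopA2_eq_toggle layer mid)]
  simp [List.append_assoc, List.map_flatMap]
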